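-- pv_equiv track=rewrite | github.com/Clear-Love/leetcode | lqb/最小质因子之和.py | get
-- ===== SOURCE A (Python) =====
-- from typing import List
--
-- def get(n) -> List[int]:
--     mFact = [0]*(n+1)
--     isPri = [True]*(n+1)
--     pri = []
--     for i in range(2, n+1):
--         if isPri[i]:
--             pri.append(i)
--             mFact[i] = i
--         for j in pri:
--             if i*j > n:
--                 break
--             isPri[i*j] = False
--             mFact[i*j] = j
--             if i % j == 0:
--                 break
--     preSum = [0]*(n+1)
--     for i in range(2, n+1):
--         preSum[i] = preSum[i-1] + mFact[i]
--     return preSum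
-- ===== SOURCE B (Python) =====
-- from typing import List
--
-- def get(n) -> List[int]:
--     preSum = [0] * (n + 1)
--     acc = 0
--     for i in range(2, n + 1):
--         d = 2
--         while d * d <= i and i % d != 0:
--             d += 1
--         acc += d if d * d <= i else i
--         preSum[i] = acc
--     return preSum
-- ===== Notes on version B (the rewrite author's own statement) =====
-- stated objective: simpler
-- what changed: Replaced the Euler/linear sieve (mFact/isPri/pri arrays with the i%j break) followed by a second prefix-sum pass by a single pass that computes each number's smallest prime factor directly by trial division up to sqrt(i) and accumulates the prefix sum on the fly.
import Mathlib
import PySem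

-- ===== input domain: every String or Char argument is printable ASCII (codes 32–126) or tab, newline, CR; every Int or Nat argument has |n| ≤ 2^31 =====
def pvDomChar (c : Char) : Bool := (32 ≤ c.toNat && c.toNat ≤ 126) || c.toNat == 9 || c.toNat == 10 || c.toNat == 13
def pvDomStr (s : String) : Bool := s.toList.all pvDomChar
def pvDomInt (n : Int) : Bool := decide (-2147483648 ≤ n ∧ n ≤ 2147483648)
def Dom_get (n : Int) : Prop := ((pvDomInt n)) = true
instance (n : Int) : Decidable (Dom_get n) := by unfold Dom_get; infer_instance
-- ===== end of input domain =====

-- B replaces A's Euler/linear sieve + second prefix pass by one pass doing trial division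
-- per number with a running accumulator: shorter and plainer, not faster (objective: simpler).

-- ===== PORT A =====
-- A's inner `for j in pri` loop with its two breaks (`i*j > n`, `i % j == 0`).
def getInnerA (n : Int) (i : Nat) (pri : List Nat) (mF : List Int) (isP : List Bool) :
    List Int × List Bool :=
  match pri with
  | [] => (mF, isP)
  | j :: rest =>
    if ((i * j : Nat) : Int) > n then (mF, isP)
    else
      let mF' := mF.set (i * j) (j : Int)
      let isP' := isP.set (i * j) false
      if i % j = 0 then (mF', isP') else getInnerA n i rest mF' isP'

-- A's main loop `for i in range(2, n+1)` over the state (mFact, isPri, pri);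
-- all Python list reads/writes are in range, so `getD`/`set` transcribe them exactly.
def getSieveA (n : Int) : List Int × List Bool × List Nat :=
  (List.range' 2 ((n + 1).toNat - 2)).foldl
    (fun st i =>
      let st1 := if st.2.1.getD i false then (st.1.set i (i : Int), st.2.1, st.2.2 ++ [i])
                 else st
      let p := getInnerA n i st1.2.2 st1.1 st1.2.1
      (p.1, p.2, st1.2.2))
    (List.replicate (n + 1).toNat 0, List.replicate (n + 1).toNat true, [])

-- A: run the sieve, then the prefix-sum loop `preSum[i] = preSum[i-1] + mFact[i]`.
def get (n : Int) : List Int :=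
  (List.range' 2 ((n + 1).toNat - 2)).foldl
    (fun ps i => ps.set i (ps.getD (i - 1) 0 + (getSieveA n).1.getD i 0))
    (List.replicate (n + 1).toNat 0)

-- ===== PORT B =====
-- B's inner `while d*d <= i and i % d != 0: d += 1` loop; returns the final d.
def trialB (i d : Nat) : Nat :=
  if d * d ≤ i ∧ i % d ≠ 0 then trialB i (d + 1) else d
termination_by i + 1 - d
decreasing_by
  rename_i h
  rcases Nat.eq_zero_or_pos d with h0 | h1
  · omega
  · have : d ≤ d * d := Nat.le_mul_of_pos_left d h1
    omega

-- B's single pass: state (preSum, acc); `acc += d if d*d <= i else i; preSum[i] = acc`.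
def get_alt (n : Int) : List Int :=
  ((List.range' 2 ((n + 1).toNat - 2)).foldl
    (fun (st : List Int × Int) i =>
      let d := trialB i 2
      let acc := st.2 + (if d * d ≤ i then (d : Int) else (i : Int))
      (st.1.set i acc, acc))
    (List.replicate (n + 1).toNat 0, 0)).1

-- ===== PRECONDITION & SPEC =====
def Spec_get (n : Int) (out : List Int) : Prop := out = get_alt n
instance (n : Int) (out : List Int) : Decidable (Spec_get n out) := by unfold Spec_get; infer_instance

-- ===== CLAIM (what is proved, stated in full; the proofs are below) =====
def Claim_equal_get : Prop := ∀ (n : Int), Dom_get n → Spec_get n (get n)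

-- ===== LEMMAS AND PROOFS =====

-- `getD` after `set`
theorem pvGetD_set {α : Type} (l : List α) (i j : Nat) (v d : α) :
    (l.set i v).getD j d = if i = j ∧ i < l.length then v else l.getD j d := by
  simp [List.getD, List.getElem?_set]
  split_ifs with h1 h2 h3 h4 <;> simp_all <;> omega

-- target prefix sums: pvS m = Σ_{k=2}^{m} minFac k
def pvS (m : Nat) : Int := ((List.range' 2 (m - 1)).map (fun k => (Nat.minFac k : Int))).sum

theorem pvS_succ (i : Nat) (h : 2 ≤ i) : pvS i = pvS (i - 1) + (Nat.minFac i : Int) := by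
  unfold pvS
  have h1 : i - 1 = (i - 2) + 1 := by omega
  rw [h1, List.range'_1_concat]
  have h3 : (i - 2) + 1 - 1 = i - 2 := by omega
  rw [h3]
  have h4 : 2 + (i - 2) = i := by omega
  rw [h4]
  simp

-- B's trial-division loop: invariant and final value
theorem pvTrial_inv (i d : Nat) : 2 ≤ d → (∀ e, 2 ≤ e → e < d → i % e ≠ 0) →
    2 ≤ trialB i d ∧ (∀ e, 2 ≤ e → e < trialB i d → i % e ≠ 0) ∧
      (trialB i d * trialB i d ≤ i → i % (trialB i d) = 0) := by
  induction d using trialB.induct (i := i) with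
  | case1 d hif ih =>
    intro hd h
    rw [trialB, if_pos hif]
    exact ih (by omega) (fun e he1 he2 => by
      rcases Nat.lt_or_ge e d with h' | h'
      · exact h e he1 h'
      · have : e = d := by omega
        subst this; exact hif.2)
  | case2 d hif =>
    intro hd h
    rw [trialB, if_neg hif]
    refine ⟨hd, h, fun hle => ?_⟩
    by_contra hne
    exact hif ⟨hle, hne⟩

theorem pvTrialB_minFac (i : Nat) (h : 2 ≤ i) :
    (if trialB i 2 * trialB i 2 ≤ i then ((trialB i 2 : Nat) : Int) else (i : Int))
      = (Nat.minFac i : Int) := by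
  obtain ⟨hr2, hmin, hdvd⟩ := pvTrial_inv i 2 le_rfl (fun e he1 he2 => by omega)
  set r := trialB i 2 with hr
  have hne1 : i ≠ 1 := by omega
  have hmf := Nat.minFac_dvd i
  have hmfp := Nat.minFac_prime hne1
  split_ifs with hsq
  · have hrd : r ∣ i := Nat.dvd_of_mod_eq_zero (hdvd hsq)
    have h1 : i.minFac ≤ r := Nat.minFac_le_of_dvd hr2 hrd
    have h2 : ¬ (i.minFac < r) := fun hlt =>
      hmin i.minFac hmfp.two_le hlt (Nat.dvd_iff_mod_eq_zero.mp hmf)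
    have : r = i.minFac := by omega
    rw [this]
  · have hip : i.Prime := by
      by_contra hnp
      have hsq' : i.minFac ^ 2 ≤ i := Nat.minFac_sq_le_self (by omega) hnp
      have hlt : i.minFac < r := by nlinarith
      exact hmin i.minFac hmfp.two_le hlt (Nat.dvd_iff_mod_eq_zero.mp hmf)
    rw [hip.minFac_eq]

-- facts about a composite number and its smallest prime factor
theorem pvComp_facts {m : Nat} (h2 : 2 ≤ m) (hnp : ¬ m.Prime) :
    2 ≤ m / m.minFac ∧ m.minFac ≤ m / m.minFac ∧ (m / m.minFac) * m.minFac = m ∧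
      m / m.minFac < m := by
  have hd := Nat.minFac_dvd m
  have hp := Nat.minFac_prime (by omega : m ≠ 1)
  have hsq : m.minFac ^ 2 ≤ m := Nat.minFac_sq_le_self (by omega) hnp
  have hle : m.minFac ≤ m / m.minFac := by
    rw [Nat.le_div_iff_mul_le (Nat.minFac_pos m)]
    nlinarith [hp.two_le]
  have hmul : (m / m.minFac) * m.minFac = m := Nat.div_mul_cancel hd
  have hlt : m / m.minFac < m := Nat.div_lt_self (by omega) hp.one_lt
  exact ⟨le_trans hp.two_le hle, hle, hmul, hlt⟩

theorem pvMinFac_mul {i j : Nat} (hi : 2 ≤ i) (hj : j.Prime) (hle : j ≤ i.minFac) :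
    (i * j).minFac = j := by
  have hdj : j ∣ i * j := ⟨i, mul_comm i j⟩
  have h1 : (i * j).minFac ≤ j := Nat.minFac_le_of_dvd hj.two_le hdj
  have hne1 : i * j ≠ 1 := by nlinarith [hj.two_le]
  have hq := Nat.minFac_prime hne1
  have hqd : (i * j).minFac ∣ i * j := Nat.minFac_dvd _
  rcases hq.dvd_mul.mp hqd with hdi | hdjj
  · have := Nat.minFac_le_of_dvd hq.two_le hdi
    omega
  · rcases (Nat.Prime.eq_one_or_self_of_dvd hj _ hdjj) with h | h
    · exact absurd h hq.one_lt.ne'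
    · omega

-- the sieve-state characterisation after iterations 2..I
def pvMEnt (I m : Nat) : Int :=
  if m.Prime then (if m ≤ I then (m : Int) else 0)
  else if 2 ≤ m ∧ m / m.minFac ≤ I then (m.minFac : Int) else 0

def pvPEnt (I m : Nat) : Bool :=
  ! (decide (2 ≤ m) && decide (¬ m.Prime) && decide (m / m.minFac ≤ I))

def pvInv (n : Int) (I : Nat) (st : List Int × List Bool × List Nat) : Prop :=
  st.1.length = (n + 1).toNat ∧ st.2.1.length = (n + 1).toNat ∧
  st.2.2 = (List.range' 2 (I - 1)).filter (fun j => decide j.Prime) ∧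
  (∀ m, m < (n + 1).toNat → st.1.getD m 0 = pvMEnt I m) ∧
  (∀ m, m < (n + 1).toNat → st.2.1.getD m false = pvPEnt I m)

-- A's inner loop = applying an assignment list
def pvAsgnList (n : Int) (i : Nat) : List Nat → List Nat
  | [] => []
  | j :: rest =>
    if ((i * j : Nat) : Int) > n then []
    else if i % j = 0 then [j] else j :: pvAsgnList n i rest

def pvApply (i : Nat) (L : List Nat) (mF : List Int) (isP : List Bool) :
    List Int × List Bool :=
  match L with
  | [] => (mF, isP)
  | j :: r => pvApply i r (mF.set (i * j) (j : Int)) (isP.set (i * j) false)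

theorem pvInner_eq (n : Int) (i : Nat) (ps : List Nat) : ∀ (mF : List Int) (isP : List Bool),
    getInnerA n i ps mF isP = pvApply i (pvAsgnList n i ps) mF isP := by
  induction ps with
  | nil => intro mF isP; rfl
  | cons j rest ih =>
    intro mF isP
    rw [getInnerA, pvAsgnList]
    split_ifs with h1 h2
    · rfl
    · rfl
    · exact ih _ _

theorem pvAsgn_char (n : Int) (i : Nat) (hi : 2 ≤ i) (ps : List Nat)
    (hsort : ps.Pairwise (· < ·)) (hp : ∀ j ∈ ps, j.Prime)
    (hcov : ∀ j ∈ ps, i.minFac < j → i.minFac ∈ ps) :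
    pvAsgnList n i ps
      = ps.filter (fun j => decide (j ≤ i.minFac) && decide (((i * j : Nat) : Int) ≤ n)) := by
  induction ps with
  | nil => rfl
  | cons j rest ih =>
    have hF : i.minFac ∣ i := Nat.minFac_dvd i
    have hle : j ≤ i.minFac := by
      by_contra hgt
      push_neg at hgt
      have hmem := hcov j (by simp) hgt
      rcases List.mem_cons.mp hmem with h | h
      · omega
      · have := (List.pairwise_cons.mp hsort).1 _ h
        omega
    rw [pvAsgnList]
    split_ifs with h1 h2
    · symm
      rw [List.filter_eq_nil_iff]
      intro a ha
      simp only [Bool.and_eq_true, decide_eq_true_eq]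
      rintro ⟨-, hna⟩
      rcases List.mem_cons.mp ha with h | h
      · subst h; omega
      · have hja := (List.pairwise_cons.mp hsort).1 _ h
        have : (i * j : Nat) ≤ (i * a : Nat) := Nat.mul_le_mul_left i (by omega)
        have : ((i * j : Nat) : Int) ≤ ((i * a : Nat) : Int) := by exact_mod_cast this
        omega
    · have hjd : j ∣ i := Nat.dvd_of_mod_eq_zero h2
      have hjF : i.minFac ≤ j := Nat.minFac_le_of_dvd (hp j (by simp)).two_le hjd
      have hjeq : j = i.minFac := by omega
      rw [List.filter_cons]
      simp only [hjeq, le_refl, decide_true, Bool.true_and]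
      have : ((i * i.minFac : Nat) : Int) ≤ n := by rw [← hjeq]; omega
      rw [if_pos (by simpa using this)]
      symm
      have : List.filter (fun a => decide (a ≤ i.minFac) && decide (((i * a : Nat) : Int) ≤ n)) rest = [] := by
        rw [List.filter_eq_nil_iff]
        intro a ha
        have := (List.pairwise_cons.mp hsort).1 _ ha
        simp only [Bool.and_eq_true, decide_eq_true_eq]
        rintro ⟨hc, -⟩
        omega
      rw [this]
    · have hjne : j ≠ i.minFac := fun he => h2 (Nat.dvd_iff_mod_eq_zero.mp (he ▸ hF))
      rw [List.filter_cons]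
      rw [if_pos (by simp only [Bool.and_eq_true, decide_eq_true_eq]; omega)]
      rw [ih (List.pairwise_cons.mp hsort).2 (fun a ha => hp a (List.mem_cons_of_mem _ ha))
        (fun a ha hFa => by
          have hmem := hcov a (List.mem_cons_of_mem _ ha) hFa
          rcases List.mem_cons.mp hmem with h | h
          · omega
          · exact h)]

theorem pvApply_char (i : Nat) (hi : 1 ≤ i) (L : List Nat) : ∀ (mF : List Int) (isP : List Bool),
    L.Nodup → (∀ j ∈ L, i * j < mF.length ∧ i * j < isP.length) →
    (pvApply i L mF isP).1.length = mF.length ∧ (pvApply i L mF isP).2.length = isP.length ∧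
    (∀ m, (pvApply i L mF isP).1.getD m 0
        = if ∃ j ∈ L, m = i * j then ((m / i : Nat) : Int) else mF.getD m 0) ∧
    (∀ m, (pvApply i L mF isP).2.getD m false
        = if ∃ j ∈ L, m = i * j then false else isP.getD m false) := by
  induction L with
  | nil => intro mF isP _ _; simp [pvApply]
  | cons j r ih =>
    intro mF isP hnd hlen
    have hndr := (List.nodup_cons.mp hnd).2
    have hjr := (List.nodup_cons.mp hnd).1
    obtain ⟨hl1, hl2, hml, hpl⟩ := ih (mF.set (i * j) (j : Int)) (isP.set (i * j) false) hndr
      (fun a ha => by have := hlen a (List.mem_cons_of_mem _ ha); simpa using this)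
    rw [pvApply]
    refine ⟨by simpa using hl1, by simpa using hl2, fun m => ?_, fun m => ?_⟩
    · rw [hml m]
      by_cases hmj : m = i * j
      · have hnr : ¬ ∃ a ∈ r, m = i * a := by
          rintro ⟨a, ha, he⟩
          have hia : i * a = i * j := by rw [← he, ← hmj]
          have haj : a = j := Nat.eq_of_mul_eq_mul_left (show 0 < i by omega) hia
          exact hjr (haj ▸ ha)
        rw [if_neg hnr, if_pos ⟨j, by simp, hmj⟩, pvGetD_set]
        rw [if_pos ⟨hmj.symm, (hlen j (by simp)).1⟩]
        subst hmj
        rw [Nat.mul_div_cancel_left j (by omega)]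
      · have he : (∃ a ∈ r, m = i * a) ↔ (∃ a ∈ j :: r, m = i * a) := by
          constructor
          · rintro ⟨a, ha, he⟩; exact ⟨a, List.mem_cons_of_mem _ ha, he⟩
          · rintro ⟨a, ha, he⟩
            rcases List.mem_cons.mp ha with h | h
            · exact absurd (h ▸ he) hmj
            · exact ⟨a, h, he⟩
        by_cases hex : ∃ a ∈ r, m = i * a
        · rw [if_pos hex, if_pos (he.mp hex)]
        · rw [if_neg hex, if_neg (fun hc => hex (he.mpr hc)), pvGetD_set,
            if_neg (fun hc => hmj hc.1.symm)]
    · rw [hpl m]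
      by_cases hmj : m = i * j
      · have hnr : ¬ ∃ a ∈ r, m = i * a := by
          rintro ⟨a, ha, he⟩
          have hia : i * a = i * j := by rw [← he, ← hmj]
          have haj : a = j := Nat.eq_of_mul_eq_mul_left (show 0 < i by omega) hia
          exact hjr (haj ▸ ha)
        rw [if_neg hnr, if_pos ⟨j, by simp, hmj⟩, pvGetD_set]
        rw [if_pos ⟨hmj.symm, (hlen j (by simp)).2⟩]
      · have he : (∃ a ∈ r, m = i * a) ↔ (∃ a ∈ j :: r, m = i * a) := by
          constructor
          · rintro ⟨a, ha, he⟩; exact ⟨a, List.mem_cons_of_mem _ ha, he⟩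
          · rintro ⟨a, ha, he⟩
            rcases List.mem_cons.mp ha with h | h
            · exact absurd (h ▸ he) hmj
            · exact ⟨a, h, he⟩
        by_cases hex : ∃ a ∈ r, m = i * a
        · rw [if_pos hex, if_pos (he.mp hex)]
        · rw [if_neg hex, if_neg (fun hc => hex (he.mpr hc)), pvGetD_set,
            if_neg (fun hc => hmj hc.1.symm)]

-- one sieve iteration updates the entry characterisations
theorem pvStep_pos (n : Int) (i m : Nat) (hi : 2 ≤ i)
    (hex : ∃ j, (j.Prime ∧ j ≤ i.minFac ∧ ((i * j : Nat) : Int) ≤ n) ∧ m = i * j) :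
    ((m / i : Nat) : Int) = pvMEnt i m ∧ pvPEnt i m = false := by
  obtain ⟨j, ⟨hjp, hjF, hjn⟩, hme⟩ := hex
  have hmf : m.minFac = j := hme ▸ pvMinFac_mul hi hjp hjF
  have hdiv : m / i = j := hme ▸ Nat.mul_div_cancel_left j (by omega)
  have hnp : ¬ m.Prime := by
    intro hmp
    rcases hmp.eq_one_or_self_of_dvd i ⟨j, hme⟩ with h | h
    · omega
    · have h1 : i * 1 = i * j := by rw [Nat.mul_one]; omega
      have h2 := Nat.eq_of_mul_eq_mul_left (show 0 < i by omega) h1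
      have := hjp.two_le
      omega
  have h2m : 2 ≤ m := by have := hjp.two_le; nlinarith
  have hq : m / m.minFac = i := by rw [hmf, hme, Nat.mul_div_cancel _ hjp.pos]
  constructor
  · unfold pvMEnt
    rw [if_neg hnp, if_pos ⟨h2m, by omega⟩, hmf, hdiv]
  · unfold pvPEnt
    simp [h2m, hnp, hq]

theorem pvStep_neg (n : Int) (i m : Nat) (hi : 2 ≤ i)
    (hex : ¬ ∃ j, (j.Prime ∧ j ≤ i.minFac ∧ ((i * j : Nat) : Int) ≤ n) ∧ m = i * j)
    (hmn : (m : Int) ≤ n) :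
    ((if i.Prime ∧ m = i then (i : Int) else pvMEnt (i - 1) m) = pvMEnt i m) ∧
      pvPEnt (i - 1) m = pvPEnt i m := by
  by_cases hmp : m.Prime
  · refine ⟨?_, ?_⟩
    · by_cases hmi : m = i
      · subst hmi
        rw [if_pos ⟨hmp, rfl⟩]
        unfold pvMEnt
        rw [if_pos hmp, if_pos (le_refl m)]
      · rw [if_neg (fun hc => hmi hc.2)]
        unfold pvMEnt
        rw [if_pos hmp, if_pos hmp]
        split_ifs <;> omega
    · unfold pvPEnt
      simp [hmp]
  · by_cases h2m : 2 ≤ m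
    · obtain ⟨hq2, hqF, hqmul, hqlt⟩ := pvComp_facts h2m hmp
      have hqi : m / m.minFac ≠ i := by
        intro hqi
        apply hex
        refine ⟨m.minFac, ⟨Nat.minFac_prime (by omega), ?_, ?_⟩, ?_⟩
        · have hiF : i.minFac ∣ i := Nat.minFac_dvd i
          have hqp : (i.minFac).Prime := Nat.minFac_prime (by omega)
          have him : i ∣ m := ⟨m.minFac, by rw [← hqi, hqmul]⟩
          exact Nat.minFac_le_of_dvd hqp.two_le (dvd_trans hiF him)
        · have h6 : i * m.minFac = m := by rw [← hqi, hqmul]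
          rw [h6]; omega
        · rw [← hqi, hqmul]
      have hdec : decide (m / m.minFac ≤ i - 1) = decide (m / m.minFac ≤ i) := by
        simp only [decide_eq_decide]
        omega
      refine ⟨?_, ?_⟩
      · rw [if_neg (fun (hc : _root_.Nat.Prime i ∧ m = i) => hmp (hc.2 ▸ hc.1))]
        unfold pvMEnt
        rw [if_neg hmp, if_neg hmp]
        split_ifs <;> omega
      · unfold pvPEnt
        rw [hdec]
    · refine ⟨?_, ?_⟩
      · rw [if_neg (fun (hc : _root_.Nat.Prime i ∧ m = i) => hmp (hc.2 ▸ hc.1))]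
        unfold pvMEnt
        rw [if_neg hmp, if_neg hmp]
        split_ifs <;> omega
      · unfold pvPEnt
        simp [h2m]

-- core of one sieve iteration, after the isPri[i] branch has been resolved
theorem pvStepCore (n : Int) (i : Nat) (hi : 2 ≤ i) (hiN : i < (n + 1).toNat)
    (mF1 : List Int) (isP : List Bool) (pri1 : List Nat)
    (hlm : mF1.length = (n + 1).toNat) (hlp : isP.length = (n + 1).toNat)
    (hpri1 : pri1 = (List.range' 2 (i - 1)).filter (fun j => decide j.Prime))
    (hm1 : ∀ m, m < (n + 1).toNat →
      mF1.getD m 0 = if i.Prime ∧ m = i then (i : Int) else pvMEnt (i - 1) m)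
    (hp1 : ∀ m, m < (n + 1).toNat → isP.getD m false = pvPEnt (i - 1) m) :
    pvInv n i ((getInnerA n i pri1 mF1 isP).1, (getInnerA n i pri1 mF1 isP).2, pri1) := by
  have hFp : (i.minFac).Prime := Nat.minFac_prime (by omega)
  have hFle : i.minFac ≤ i := Nat.minFac_le (by omega)
  have hmemp : ∀ j, j ∈ pri1 ↔ (j.Prime ∧ j ≤ i) := by
    intro j
    rw [hpri1, List.mem_filter, List.mem_range'_1]
    simp only [decide_eq_true_eq]
    constructor
    · rintro ⟨⟨h1, h2⟩, h3⟩; exact ⟨h3, by omega⟩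
    · rintro ⟨h1, h2⟩; exact ⟨⟨h1.two_le, by omega⟩, h1⟩
  have hsort : pri1.Pairwise (· < ·) := by
    rw [hpri1]; exact List.Pairwise.filter _ (List.pairwise_lt_range' 1)
  have hall : ∀ j ∈ pri1, j.Prime := fun j hj => ((hmemp j).mp hj).1
  have hcov : ∀ j ∈ pri1, i.minFac < j → i.minFac ∈ pri1 :=
    fun j hj hlt => (hmemp _).mpr ⟨hFp, hFle⟩
  rw [pvInner_eq, pvAsgn_char n i hi pri1 hsort hall hcov]
  have hLnd : (pri1.filter
      (fun j => decide (j ≤ i.minFac) && decide (((i * j : Nat) : Int) ≤ n))).Nodup :=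
    List.Nodup.filter _ (List.Pairwise.imp (fun h => Nat.ne_of_lt h) hsort)
  have hLm : ∀ j, j ∈ pri1.filter
        (fun j => decide (j ≤ i.minFac) && decide (((i * j : Nat) : Int) ≤ n))
      ↔ (j.Prime ∧ j ≤ i.minFac ∧ ((i * j : Nat) : Int) ≤ n) := by
    intro j
    rw [List.mem_filter]
    simp only [Bool.and_eq_true, decide_eq_true_eq]
    constructor
    · rintro ⟨h0, h3, h4⟩; exact ⟨((hmemp j).mp h0).1, h3, h4⟩
    · rintro ⟨h1, h3, h4⟩; exact ⟨(hmemp j).mpr ⟨h1, by omega⟩, h3, h4⟩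
  have hLlen : ∀ j ∈ pri1.filter
        (fun j => decide (j ≤ i.minFac) && decide (((i * j : Nat) : Int) ≤ n)),
      i * j < mF1.length ∧ i * j < isP.length := by
    intro j hj
    obtain ⟨-, -, h4⟩ := (hLm j).mp hj
    rw [hlm, hlp]
    omega
  obtain ⟨hA1, hA2, hE1, hE2⟩ := pvApply_char i (by omega) _ mF1 isP hLnd hLlen
  refine ⟨by rw [hA1, hlm], by rw [hA2, hlp], hpri1, ?_, ?_⟩
  · intro m hm
    rw [hE1 m]
    by_cases hex : ∃ j ∈ pri1.filter
        (fun j => decide (j ≤ i.minFac) && decide (((i * j : Nat) : Int) ≤ n)), m = i * j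
    · rw [if_pos hex]
      obtain ⟨j, hj, he⟩ := hex
      exact (pvStep_pos n i m hi ⟨j, (hLm j).mp hj, he⟩).1
    · rw [if_neg hex, hm1 m hm]
      have hex' : ¬ ∃ j, (j.Prime ∧ j ≤ i.minFac ∧ ((i * j : Nat) : Int) ≤ n) ∧ m = i * j := by
        rintro ⟨j, hc, he⟩; exact hex ⟨j, (hLm j).mpr hc, he⟩
      exact (pvStep_neg n i m hi hex' (by omega)).1
  · intro m hm
    rw [hE2 m]
    by_cases hex : ∃ j ∈ pri1.filter
        (fun j => decide (j ≤ i.minFac) && decide (((i * j : Nat) : Int) ≤ n)), m = i * j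
    · rw [if_pos hex]
      obtain ⟨j, hj, he⟩ := hex
      exact ((pvStep_pos n i m hi ⟨j, (hLm j).mp hj, he⟩).2).symm
    · rw [if_neg hex, hp1 m hm]
      have hex' : ¬ ∃ j, (j.Prime ∧ j ≤ i.minFac ∧ ((i * j : Nat) : Int) ≤ n) ∧ m = i * j := by
        rintro ⟨j, hc, he⟩; exact hex ⟨j, (hLm j).mpr hc, he⟩
      exact (pvStep_neg n i m hi hex' (by omega)).2

-- one full iteration of A's outer loop preserves the invariant
theorem pvStep (n : Int) (i : Nat) (hi : 2 ≤ i) (hiN : i < (n + 1).toNat)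
    (st : List Int × List Bool × List Nat) (hinv : pvInv n (i - 1) st) :
    pvInv n i
      (let st1 := if st.2.1.getD i false then (st.1.set i (i : Int), st.2.1, st.2.2 ++ [i]) else st
       let p := getInnerA n i st1.2.2 st1.1 st1.2.1
       (p.1, p.2, st1.2.2)) := by
  obtain ⟨mF, isP, pri⟩ := st
  obtain ⟨hlm, hlp, hpri, hm, hp⟩ := hinv
  simp only at hlm hlp hpri hm hp ⊢
  have hread : isP.getD i false = decide i.Prime := by
    rw [hp i hiN]
    unfold pvPEnt
    by_cases hip : i.Prime
    · simp [hip]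
    · obtain ⟨-, -, -, hlt⟩ := pvComp_facts hi hip
      simp [hip, hi]
      try omega
  rw [hread]
  have hconc : i - 1 = (i - 2) + 1 := by omega
  have hconc2 : 2 + (i - 2) = i := by omega
  have hpri' : pri = (List.range' 2 (i - 2)).filter (fun j => decide j.Prime) := by
    rw [hpri, show i - 1 - 1 = i - 2 from by omega]
  by_cases hip : i.Prime
  · rw [if_pos (by simp [hip])]
    exact pvStepCore n i hi hiN (mF.set i (i : Int)) isP (pri ++ [i])
      (by simpa using hlm) hlp
      (by
        rw [hconc, List.range'_1_concat, hconc2, List.filter_append, hpri']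
        simp [hip])
      (by
        intro m hm'
        rw [pvGetD_set]
        by_cases hmi : m = i
        · rw [if_pos ⟨hmi.symm, by rw [hlm]; exact hiN⟩, if_pos ⟨hip, hmi⟩]
        · rw [if_neg (fun hc => hmi hc.1.symm), if_neg (fun hc => hmi hc.2), hm m hm'])
      hp
  · rw [if_neg (by simp [hip])]
    exact pvStepCore n i hi hiN mF isP pri hlm hlp
      (by
        rw [hconc, List.range'_1_concat, hconc2, List.filter_append, hpri']
        simp [hip])
      (by
        intro m hm'
        rw [if_neg (fun (hc : _root_.Nat.Prime i ∧ m = i) => hip hc.1), hm m hm'])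
      hp

-- the invariant holds after the first k iterations of A's sieve
theorem pvSieveAux (n : Int) (k : Nat) (hk : 2 + k ≤ (n + 1).toNat) :
    pvInv n (k + 1)
      ((List.range' 2 k).foldl
        (fun st i =>
          let st1 := if st.2.1.getD i false then (st.1.set i (i : Int), st.2.1, st.2.2 ++ [i])
                     else st
          let p := getInnerA n i st1.2.2 st1.1 st1.2.1
          (p.1, p.2, st1.2.2))
        (List.replicate (n + 1).toNat 0, List.replicate (n + 1).toNat true, [])) := by
  induction k with
  | zero =>
    refine ⟨by simp, by simp, by simp, ?_, ?_⟩
    · intro m hm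
      simp only [show List.range' 2 0 = [] from rfl, List.foldl_nil]
      rw [List.getD_replicate _ (by simpa using hm)]
      unfold pvMEnt
      by_cases hmp : m.Prime
      · rw [if_pos hmp, if_neg (by have := hmp.two_le; omega)]
      · rw [if_neg hmp]
        by_cases h2m : 2 ≤ m
        · obtain ⟨hq2, -, -, -⟩ := pvComp_facts h2m hmp
          rw [if_neg (by rintro ⟨-, hb⟩; omega)]
        · rw [if_neg (fun hc => h2m hc.1)]
    · intro m hm
      simp only [show List.range' 2 0 = [] from rfl, List.foldl_nil]
      rw [List.getD_replicate _ (by simpa using hm)]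
      unfold pvPEnt
      by_cases hmp : m.Prime
      · simp [hmp]
      · by_cases h2m : 2 ≤ m
        · obtain ⟨hq2, -, -, -⟩ := pvComp_facts h2m hmp
          simp [hmp, h2m]
          omega
        · simp [h2m]
  | succ k ih =>
    rw [List.range'_1_concat, List.foldl_append]
    have h21 : 2 + k - 1 = k + 1 := by omega
    have hstep := pvStep n (2 + k) (by omega) (by omega) _ (by rw [h21]; exact ih (by omega))
    simp only [List.foldl_cons, List.foldl_nil]
    rw [show k + 1 + 1 = 2 + k from by omega]
    exact hstep

-- A's final mFact array holds the smallest prime factors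
theorem pvSieve_final (n : Int) (h3 : 3 ≤ (n + 1).toNat) :
    (getSieveA n).1.length = (n + 1).toNat ∧
    (∀ m, m < (n + 1).toNat →
      (getSieveA n).1.getD m 0 = if 2 ≤ m then (m.minFac : Int) else 0) := by
  obtain ⟨h1, -, -, h4, -⟩ := pvSieveAux n ((n + 1).toNat - 2) (by omega)
  unfold getSieveA
  refine ⟨h1, fun m hm => ?_⟩
  rw [h4 m hm]
  unfold pvMEnt
  by_cases hmp : m.Prime
  · rw [if_pos hmp, if_pos (by omega), if_pos hmp.two_le, hmp.minFac_eq]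
  · rw [if_neg hmp]
    by_cases h2m : 2 ≤ m
    · obtain ⟨-, -, -, hlt⟩ := pvComp_facts h2m hmp
      rw [if_pos ⟨h2m, by omega⟩, if_pos h2m]
    · rw [if_neg (fun hc => h2m hc.1), if_neg h2m]

-- A's prefix-sum loop
theorem pvPreAux (n : Int) (h3 : 3 ≤ (n + 1).toNat) (k : Nat) (hk : 2 + k ≤ (n + 1).toNat) :
    ((List.range' 2 k).foldl
        (fun ps i => ps.set i (ps.getD (i - 1) 0 + (getSieveA n).1.getD i 0))
        (List.replicate (n + 1).toNat 0)).length = (n + 1).toNat ∧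
    ∀ m, m < (n + 1).toNat →
      ((List.range' 2 k).foldl
          (fun ps i => ps.set i (ps.getD (i - 1) 0 + (getSieveA n).1.getD i 0))
          (List.replicate (n + 1).toNat 0)).getD m 0
        = if 2 ≤ m ∧ m ≤ k + 1 then pvS m else 0 := by
  induction k with
  | zero =>
    refine ⟨by simp, fun m hm => ?_⟩
    simp only [show List.range' 2 0 = [] from rfl, List.foldl_nil]
    rw [List.getD_replicate _ (by simpa using hm), if_neg (by omega)]
  | succ k ih =>
    obtain ⟨ihl, ihe⟩ := ih (by omega)
    rw [List.range'_1_concat, List.foldl_append]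
    refine ⟨by simpa using ihl, fun m hm => ?_⟩
    simp only [List.foldl_cons, List.foldl_nil]
    rw [pvGetD_set]
    have harg : 2 + k - 1 = k + 1 := by omega
    have hprev : ((List.range' 2 k).foldl
        (fun ps i => ps.set i (ps.getD (i - 1) 0 + (getSieveA n).1.getD i 0))
        (List.replicate (n + 1).toNat 0)).getD (2 + k - 1) 0 = pvS (k + 1) := by
      rw [harg, ihe (k + 1) (by omega)]
      by_cases h2k : 2 ≤ k + 1
      · rw [if_pos ⟨h2k, le_refl _⟩]
      · have hk0 : k = 0 := by omega
        subst hk0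
        rw [if_neg (by omega)]
        rfl
    have hmf : (getSieveA n).1.getD (2 + k) 0 = (((2 + k : Nat).minFac : Nat) : Int) := by
      obtain ⟨-, hfe⟩ := pvSieve_final n h3
      rw [hfe (2 + k) (by omega), if_pos (by omega)]
    by_cases hmi : m = 2 + k
    · rw [if_pos ⟨hmi.symm, by rw [ihl]; omega⟩, hprev, hmf, if_pos (by omega)]
      subst hmi
      rw [pvS_succ (2 + k) (by omega), harg]
    · rw [if_neg (fun hc => hmi hc.1.symm), ihe m hm]
      split_ifs <;> first | rfl | omega

-- B's single pass
theorem pvPreBAux (n : Int) (k : Nat) (hk : 2 + k ≤ (n + 1).toNat) :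
    ((List.range' 2 k).foldl
        (fun (st : List Int × Int) i =>
          let d := trialB i 2
          let acc := st.2 + (if d * d ≤ i then (d : Int) else (i : Int))
          (st.1.set i acc, acc))
        (List.replicate (n + 1).toNat 0, 0)).2 = pvS (k + 1) ∧
    ((List.range' 2 k).foldl
        (fun (st : List Int × Int) i =>
          let d := trialB i 2
          let acc := st.2 + (if d * d ≤ i then (d : Int) else (i : Int))
          (st.1.set i acc, acc))
        (List.replicate (n + 1).toNat 0, 0)).1.length = (n + 1).toNat ∧
    ∀ m, m < (n + 1).toNat →
      ((List.range' 2 k).foldl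
          (fun (st : List Int × Int) i =>
            let d := trialB i 2
            let acc := st.2 + (if d * d ≤ i then (d : Int) else (i : Int))
            (st.1.set i acc, acc))
          (List.replicate (n + 1).toNat 0, 0)).1.getD m 0
        = if 2 ≤ m ∧ m ≤ k + 1 then pvS m else 0 := by
  induction k with
  | zero =>
    refine ⟨by rfl, by simp, fun m hm => ?_⟩
    simp only [show List.range' 2 0 = [] from rfl, List.foldl_nil]
    rw [List.getD_replicate _ (by simpa using hm), if_neg (by omega)]
  | succ k ih =>
    obtain ⟨iha, ihl, ihe⟩ := ih (by omega)
    rw [List.range'_1_concat, List.foldl_append]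
    simp only [List.foldl_cons, List.foldl_nil]
    have hval : (if trialB (2 + k) 2 * trialB (2 + k) 2 ≤ 2 + k
        then ((trialB (2 + k) 2 : Nat) : Int) else ((2 + k : Nat) : Int))
        = (((2 + k : Nat).minFac : Nat) : Int) := pvTrialB_minFac (2 + k) (by omega)
    have harg : 2 + k - 1 = k + 1 := by omega
    have hacc : pvS (k + 1) + (((2 + k : Nat).minFac : Nat) : Int) = pvS (k + 2) := by
      rw [show k + 2 = 2 + k from by omega, pvS_succ (2 + k) (by omega), harg]
    refine ⟨?_, by simpa using ihl, fun m hm => ?_⟩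
    · simp only [iha, hval]
      rw [hacc]
    · rw [pvGetD_set]
      by_cases hmi : m = 2 + k
      · rw [if_pos ⟨hmi.symm, by rw [ihl]; omega⟩]
        simp only [iha, hval]
        rw [hacc, if_pos (by omega)]
        congr 1
        omega
      · rw [if_neg (fun hc => hmi hc.1.symm), ihe m hm]
        split_ifs <;> first | rfl | omega

-- ===== VERDICT (by name: the statement is the Claim_ definition above) =====
theorem get_spec : Claim_equal_get := by
  intro n _
  unfold Spec_get
  by_cases h3 : 3 ≤ (n + 1).toNat
  · obtain ⟨hal, hae⟩ := pvPreAux n h3 ((n + 1).toNat - 2) (by omega)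
    obtain ⟨-, hbl, hbe⟩ := pvPreBAux n ((n + 1).toNat - 2) (by omega)
    unfold _root_.get get_alt
    apply List.ext_getElem (by rw [hal, hbl])
    intro m h1 h2
    have hm : m < (n + 1).toNat := by rw [hal] at h1; exact h1
    rw [← List.getD_eq_getElem _ 0 h1, ← List.getD_eq_getElem _ 0 h2]
    rw [hae m hm, hbe m hm]
  · have h0 : (n + 1).toNat - 2 = 0 := by omega
    unfold _root_.get get_alt
    rw [h0]
    rfl
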